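-- pv_equiv track=rewrite | github.com/RedBearAK/PDF-Manipulator | pdf_manipulator/scraper/extractors/trimming.py | validate_trimming_feasibility
-- ===== SOURCE A (Python) =====
-- from typing import List, Tuple, Union
--
-- def validate_trimming_feasibility(content: str, start_trimmers: List[Tuple[str, int]],
--                                 end_trimmers: List[Tuple[str, int]]) -> List[str]:
--     """
--     Check if trimming operations are feasible without over-trimming.
--
--     Args:
--         content: Content to be trimmed
--         start_trimmers: Start trimming operations
--         end_trimmers: End trimming operations
--
--     Returns:
--         List of warning messages (empty if no issues)
--     """
--     warnings = []
--
--     if not content: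
--         if start_trimmers or end_trimmers:
--             warnings.append("Cannot trim empty content")
--         return warnings
--
--     # Quick check for character over-trimming
--     start_chars = sum(count for t_type, count in start_trimmers if t_type == 'ch')
--     end_chars = sum(count for t_type, count in end_trimmers if t_type == 'ch')
--
--     if start_chars + end_chars >= len(content):
--         warnings.append(
--             f"Character trimming ({start_chars} start + {end_chars} end = "
--             f"{start_chars + end_chars}) exceeds content length ({len(content)})"
--         )
--
--     # Check word over-trimming
--     words = content.split()
--     start_words = sum(count for t_type, count in start_trimmers if t_type == 'wd')
--     end_words = sum(count for t_type, count in end_trimmers if t_type == 'wd')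
--
--     if start_words + end_words >= len(words):
--         warnings.append(
--             f"Word trimming ({start_words} start + {end_words} end = "
--             f"{start_words + end_words}) exceeds word count ({len(words)})"
--         )
--
--     # Check line over-trimming
--     lines = content.split('\n')
--     start_lines = sum(count for t_type, count in start_trimmers if t_type == 'ln')
--     end_lines = sum(count for t_type, count in end_trimmers if t_type == 'ln')
--
--     if start_lines + end_lines >= len(lines):
--         warnings.append(
--             f"Line trimming ({start_lines} start + {end_lines} end = "
--             f"{start_lines + end_lines}) exceeds line count ({len(lines)})"
--         )
--
--     return warnings
-- ===== SOURCE B (Python) =====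
-- def validate_trimming_feasibility(content, start_trimmers, end_trimmers):
--     if not content:
--         return ["Cannot trim empty content"] if (start_trimmers or end_trimmers) else []
--
--     # One character scan computes content length, word count and line count
--     # together (word-boundary state machine), without building the word/line lists.
--     chars = 0
--     words = 0
--     newlines = 0
--     in_word = False
--     for c in content:
--         chars += 1
--         if c == '\n':
--             newlines += 1
--         if c.isspace():
--             in_word = False
--         else:
--             if not in_word:
--                 words += 1
--             in_word = True
--     lines = newlines + 1
--
--     # One pass per trimmer list accumulates all three totals at once.
--     def totals(trimmers):
--         ch = wd = ln = 0
--         for t_type, count in trimmers: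
--             if t_type == 'ch':
--                 ch += count
--             elif t_type == 'wd':
--                 wd += count
--             elif t_type == 'ln':
--                 ln += count
--         return ch, wd, ln
--
--     s_ch, s_wd, s_ln = totals(start_trimmers)
--     e_ch, e_wd, e_ln = totals(end_trimmers)
--
--     warnings = []
--     if s_ch + e_ch >= chars:
--         warnings.append(
--             f"Character trimming ({s_ch} start + {e_ch} end = "
--             f"{s_ch + e_ch}) exceeds content length ({chars})"
--         )
--     if s_wd + e_wd >= words:
--         warnings.append(
--             f"Word trimming ({s_wd} start + {e_wd} end = "
--             f"{s_wd + e_wd}) exceeds word count ({words})"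
--         )
--     if s_ln + e_ln >= lines:
--         warnings.append(
--             f"Line trimming ({s_ln} start + {e_ln} end = "
--             f"{s_ln + e_ln}) exceeds line count ({lines})"
--         )
--     return warnings
-- ===== Notes on version B (the rewrite author's own statement) =====
-- stated objective: alternative
-- what changed: B computes content length, word count and line count in one character scan with a word-boundary state machine instead of A's split()/split('\n') intermediate lists, and accumulates each trimmer list's three totals in a single triple-accumulator pass instead of six filtered sum-comprehensions.
import Mathlib
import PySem

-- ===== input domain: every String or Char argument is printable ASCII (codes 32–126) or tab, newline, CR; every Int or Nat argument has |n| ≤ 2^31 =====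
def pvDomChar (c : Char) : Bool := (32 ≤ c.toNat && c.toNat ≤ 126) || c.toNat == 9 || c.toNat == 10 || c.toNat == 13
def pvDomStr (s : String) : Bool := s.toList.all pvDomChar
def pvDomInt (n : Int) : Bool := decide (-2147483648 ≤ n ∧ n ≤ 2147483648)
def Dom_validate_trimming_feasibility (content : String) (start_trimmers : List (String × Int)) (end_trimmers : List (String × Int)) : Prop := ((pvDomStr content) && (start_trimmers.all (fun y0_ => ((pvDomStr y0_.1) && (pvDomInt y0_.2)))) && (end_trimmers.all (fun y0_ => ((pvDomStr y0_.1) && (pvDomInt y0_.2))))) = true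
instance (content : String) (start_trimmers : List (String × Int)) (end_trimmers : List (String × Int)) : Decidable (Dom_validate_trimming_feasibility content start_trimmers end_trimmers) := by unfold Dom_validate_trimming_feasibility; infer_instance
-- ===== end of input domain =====

-- B replaces A's split()-based counting by one character scan with a word-boundary state
-- machine (length, word count and newline count in a single pass, no intermediate lists)
-- and one triple-accumulator pass per trimmer list instead of six filtered sums
-- (objective: alternative).

-- ===== PORT A =====
-- A, transliterated: empty guard; six filtered sums (Python sum-genexprs → foldl); three
-- conditional appends to `warnings` with inline f-strings (f-string → String.ofList of char-list
-- concatenation via PySem.Int.toChars; exact on the domain).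
def validate_trimming_feasibility (content : String) (start_trimmers : List (String × Int)) (end_trimmers : List (String × Int)) : List String :=
  if content.toList.isEmpty then
    (if !start_trimmers.isEmpty || !end_trimmers.isEmpty then ["Cannot trim empty content"] else [])
  else
    let start_chars : Int := start_trimmers.foldl (fun acc p => if p.1 == "ch" then acc + p.2 else acc) 0
    let end_chars : Int := end_trimmers.foldl (fun acc p => if p.1 == "ch" then acc + p.2 else acc) 0
    let warnings : List String := []
    let warnings :=
      if start_chars + end_chars ≥ PySem.Str.len content then
        warnings ++ [String.ofList ("Character trimming (".toList ++ PySem.Int.toChars start_chars ++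
          " start + ".toList ++ PySem.Int.toChars end_chars ++ " end = ".toList ++
          PySem.Int.toChars (start_chars + end_chars) ++ ") exceeds content length (".toList ++
          PySem.Int.toChars (PySem.Str.len content) ++ ")".toList)]
      else warnings
    let words : List String := PySem.Str.split₀ content
    let start_words : Int := start_trimmers.foldl (fun acc p => if p.1 == "wd" then acc + p.2 else acc) 0
    let end_words : Int := end_trimmers.foldl (fun acc p => if p.1 == "wd" then acc + p.2 else acc) 0
    let warnings :=
      if start_words + end_words ≥ (words.length : Int) then
        warnings ++ [String.ofList ("Word trimming (".toList ++ PySem.Int.toChars start_words ++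
          " start + ".toList ++ PySem.Int.toChars end_words ++ " end = ".toList ++
          PySem.Int.toChars (start_words + end_words) ++ ") exceeds word count (".toList ++
          PySem.Int.toChars ((words.length : Int)) ++ ")".toList)]
      else warnings
    -- split('\n') with a non-empty literal separator never raises: split? is always `some`
    let lines : List String := (PySem.Str.split? content "\n").getD []
    let start_lines : Int := start_trimmers.foldl (fun acc p => if p.1 == "ln" then acc + p.2 else acc) 0
    let end_lines : Int := end_trimmers.foldl (fun acc p => if p.1 == "ln" then acc + p.2 else acc) 0
    let warnings :=
      if start_lines + end_lines ≥ (lines.length : Int) then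
        warnings ++ [String.ofList ("Line trimming (".toList ++ PySem.Int.toChars start_lines ++
          " start + ".toList ++ PySem.Int.toChars end_lines ++ " end = ".toList ++
          PySem.Int.toChars (start_lines + end_lines) ++ ") exceeds line count (".toList ++
          PySem.Int.toChars ((lines.length : Int)) ++ ")".toList)]
      else warnings
    warnings

-- ===== PORT B =====
-- B's per-character step of the one-pass scan: state = (chars, words, newlines, in_word).
-- c.isspace() → PySem.Chars.isspace (CPython-exact).
def pvStep (s : Int × Int × Int × Bool) (c : Char) : Int × Int × Int × Bool :=
  let chars := s.1 + 1
  let newlines := if c = '\n' then s.2.2.1 + 1 else s.2.2.1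
  if PySem.Chars.isspace c then (chars, s.2.1, newlines, false)
  else (chars, (if s.2.2.2 then s.2.1 else s.2.1 + 1), newlines, true)

-- B's totals(): one pass over a trimmer list accumulating the (ch, wd, ln) triple.
def pvTotals (trimmers : List (String × Int)) : Int × Int × Int :=
  trimmers.foldl (fun a p =>
    if p.1 == "ch" then (a.1 + p.2, a.2.1, a.2.2)
    else if p.1 == "wd" then (a.1, a.2.1 + p.2, a.2.2)
    else if p.1 == "ln" then (a.1, a.2.1, a.2.2 + p.2)
    else a) (0, 0, 0)

def validate_trimming_feasibility_alt (content : String) (start_trimmers : List (String × Int)) (end_trimmers : List (String × Int)) : List String :=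
  if content.toList.isEmpty then
    (if !start_trimmers.isEmpty || !end_trimmers.isEmpty then ["Cannot trim empty content"] else [])
  else
    let st := content.toList.foldl pvStep (0, 0, 0, false)
    let chars := st.1
    let words := st.2.1
    let lines := st.2.2.1 + 1
    let s := pvTotals start_trimmers
    let e := pvTotals end_trimmers
    (if s.1 + e.1 ≥ chars then
      [String.ofList ("Character trimming (".toList ++ PySem.Int.toChars s.1 ++
        " start + ".toList ++ PySem.Int.toChars e.1 ++ " end = ".toList ++
        PySem.Int.toChars (s.1 + e.1) ++ ") exceeds content length (".toList ++
        PySem.Int.toChars chars ++ ")".toList)]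
     else []) ++
    (if s.2.1 + e.2.1 ≥ words then
      [String.ofList ("Word trimming (".toList ++ PySem.Int.toChars s.2.1 ++
        " start + ".toList ++ PySem.Int.toChars e.2.1 ++ " end = ".toList ++
        PySem.Int.toChars (s.2.1 + e.2.1) ++ ") exceeds word count (".toList ++
        PySem.Int.toChars words ++ ")".toList)]
     else []) ++
    (if s.2.2 + e.2.2 ≥ lines then
      [String.ofList ("Line trimming (".toList ++ PySem.Int.toChars s.2.2 ++
        " start + ".toList ++ PySem.Int.toChars e.2.2 ++ " end = ".toList ++
        PySem.Int.toChars (s.2.2 + e.2.2) ++ ") exceeds line count (".toList ++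
        PySem.Int.toChars lines ++ ")".toList)]
     else [])

-- ===== PRECONDITION & SPEC =====
def Spec_validate_trimming_feasibility (content : String) (start_trimmers : List (String × Int)) (end_trimmers : List (String × Int)) (out : List String) : Prop := out = validate_trimming_feasibility_alt content start_trimmers end_trimmers
instance (content : String) (start_trimmers : List (String × Int)) (end_trimmers : List (String × Int)) (out : List String) : Decidable (Spec_validate_trimming_feasibility content start_trimmers end_trimmers out) := by unfold Spec_validate_trimming_feasibility; infer_instance

-- ===== CLAIM =====
def Claim_equal_validate_trimming_feasibility : Prop := ∀ (content : String) (start_trimmers : List (String × Int)) (end_trimmers : List (String × Int)), Dom_validate_trimming_feasibility content start_trimmers end_trimmers → Spec_validate_trimming_feasibility content start_trimmers end_trimmers (validate_trimming_feasibility content start_trimmers end_trimmers)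

-- ===== LEMMAS AND PROOFS =====

-- Word count of cs given whether the scan is currently inside a word (specification of
-- both split₀'s grouping and B's state machine).
def pvWcnt (cs : List Char) (inW : Bool) : Nat :=
  match cs with
  | [] => 0
  | c :: rest =>
    if PySem.Chars.isspace c then pvWcnt rest false
    else (if inW then 0 else 1) + pvWcnt rest true

-- Final in_word flag of the scan.
def pvEndW (cs : List Char) (b : Bool) : Bool :=
  match cs with
  | [] => b
  | c :: rest => pvEndW rest (!PySem.Chars.isspace c)

theorem pvWcnt_cons (c : Char) (rest : List Char) (b : Bool) :
    pvWcnt (c :: rest) b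
      = if PySem.Chars.isspace c then pvWcnt rest false
        else (if b then 0 else 1) + pvWcnt rest true := rfl

theorem pvEndW_cons (c : Char) (rest : List Char) (b : Bool) :
    pvEndW (c :: rest) b = pvEndW rest (!PySem.Chars.isspace c) := rfl

-- The number of pieces split₀ produces is pvWcnt.
theorem split₀_go_length (cs : List Char) (cur : List Char) (acc : List (List Char)) :
    (PySem.Chars.split₀.go cs cur acc).length
      = acc.length + (if cur.isEmpty then 0 else 1) + pvWcnt cs (!cur.isEmpty) := by
  induction cs generalizing cur acc with
  | nil =>
    unfold PySem.Chars.split₀.go pvWcnt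
    split_ifs with h <;> simp
  | cons c rest ih =>
    unfold PySem.Chars.split₀.go pvWcnt
    split_ifs with hs hc <;> rw [ih] <;> simp_all <;> omega

-- The number of pieces split-on-'\n' produces is the newline count plus one.
theorem splitOn_go_length (fuel : Nat) (l cur : List Char) (acc : List (List Char))
    (h : l.length < fuel) :
    (PySem.Chars.splitOn.go ['\n'] fuel l cur acc).length
      = acc.length + 1 + l.count '\n' := by
  induction fuel generalizing l cur acc with
  | zero => omega
  | succ fuel ih =>
    cases l with
    | nil => unfold PySem.Chars.splitOn.go; simp
    | cons c rest =>
      unfold PySem.Chars.splitOn.go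
      by_cases hp : List.isPrefixOf ['\n'] (c :: rest) = true
      · have hc : '\n' = c := by simpa [List.isPrefixOf] using hp
        rw [if_pos hp, ih _ _ _ (by simp at h ⊢; omega)]
        rw [← hc]
        simp
        omega
      · have hc : ¬ (c = '\n') := by
          intro hh; subst hh; simp [List.isPrefixOf] at hp
        simp only [hp, Bool.false_eq_true, if_false]
        rw [ih _ _ _ (by simp at h ⊢; omega)]
        simp [hc]

-- B's scan, fully characterised: length, pvWcnt, newline count and final flag.
theorem scan_spec (cs : List Char) (ch w nl : Int) (b : Bool) :
    cs.foldl pvStep (ch, w, nl, b)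
      = (ch + cs.length, w + pvWcnt cs b, nl + cs.count '\n', pvEndW cs b) := by
  induction cs generalizing ch w nl b with
  | nil => simp [pvWcnt, pvEndW]
  | cons c rest ih =>
    rw [List.foldl_cons, ih]
    unfold pvStep
    rw [pvWcnt_cons, pvEndW_cons]
    by_cases hs : PySem.Chars.isspace c = true <;>
      by_cases hn : c = '\n' <;>
      by_cases hb : b = true <;>
      simp_all [Prod.ext_iff] <;> omega

-- A filtered-sum foldl started at a equals a plus the foldl started at 0.
theorem foldl_sum_shift (k : String) (l : List (String × Int)) (a : Int) :
    l.foldl (fun acc p => if p.1 == k then acc + p.2 else acc) a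
      = a + l.foldl (fun acc p => if p.1 == k then acc + p.2 else acc) 0 := by
  induction l generalizing a with
  | nil => simp
  | cons p t ih =>
    simp only [List.foldl_cons]
    rw [ih, ih (if p.1 == k then 0 + p.2 else 0)]
    split_ifs <;> ring

-- Peeling one element off a filtered sum.
theorem foldl_sum_cons (k : String) (p : String × Int) (t : List (String × Int)) :
    (p :: t).foldl (fun acc q => if q.1 == k then acc + q.2 else acc) 0
      = (if p.1 == k then p.2 else 0)
          + t.foldl (fun acc q => if q.1 == k then acc + q.2 else acc) 0 := by
  simp only [List.foldl_cons]
  rw [foldl_sum_shift]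
  split_ifs <;> ring

-- B's one-pass triple equals A's three filtered sums.
theorem pvTotals_spec (l : List (String × Int)) :
    pvTotals l = (l.foldl (fun acc p => if p.1 == "ch" then acc + p.2 else acc) 0,
                  l.foldl (fun acc p => if p.1 == "wd" then acc + p.2 else acc) 0,
                  l.foldl (fun acc p => if p.1 == "ln" then acc + p.2 else acc) 0) := by
  suffices h : ∀ (a : Int × Int × Int), l.foldl (fun a p =>
      if p.1 == "ch" then (a.1 + p.2, a.2.1, a.2.2)
      else if p.1 == "wd" then (a.1, a.2.1 + p.2, a.2.2)
      else if p.1 == "ln" then (a.1, a.2.1, a.2.2 + p.2)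
      else a) a
    = (a.1 + l.foldl (fun acc p => if p.1 == "ch" then acc + p.2 else acc) 0,
       a.2.1 + l.foldl (fun acc p => if p.1 == "wd" then acc + p.2 else acc) 0,
       a.2.2 + l.foldl (fun acc p => if p.1 == "ln" then acc + p.2 else acc) 0) by
    unfold pvTotals; rw [h]; simp
  induction l with
  | nil => intro a; simp
  | cons p t ih =>
    intro a
    rw [List.foldl_cons, ih, foldl_sum_cons "ch", foldl_sum_cons "wd", foldl_sum_cons "ln"]
    by_cases h1 : p.1 == "ch" <;> by_cases h2 : p.1 == "wd" <;> by_cases h3 : p.1 == "ln" <;>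
      simp_all [Prod.ext_iff] <;> omega

-- Lengths of A's word list and line list, via the Str→Chars bridges.
theorem words_length (s : String) :
    ((PySem.Str.split₀ s).length : Int) = pvWcnt s.toList false := by
  have h := PySem.Str.split₀_map_toList s
  have hl : (PySem.Str.split₀ s).length = (PySem.Chars.split₀ s.toList).length := by
    rw [← h, List.length_map]
  rw [hl]
  unfold PySem.Chars.split₀
  rw [split₀_go_length]
  simp

theorem lines_length (s : String) :
    (((PySem.Str.split? s "\n").getD []).length : Int) = (s.toList.count '\n' : Int) + 1 := by
  have h := PySem.Str.split?_map s "\n"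
  have hsep : ("\n".toList : List Char) = ['\n'] := by decide
  rw [hsep] at h
  have hne : (['\n'] : List Char).isEmpty = false := by decide
  unfold PySem.Chars.split? at h
  rw [hne] at h
  simp only [Bool.false_eq_true, if_false] at h
  cases hs : PySem.Str.split? s "\n" with
  | none => rw [hs] at h; simp at h
  | some ys =>
    rw [hs] at h
    simp only [Option.map_some, Option.some.injEq] at h
    have hlen : ys.length = (PySem.Chars.splitOn s.toList ['\n']).length := by
      rw [← h, List.length_map]
    unfold PySem.Chars.splitOn at hlen
    rw [splitOn_go_length _ _ _ _ (by omega)] at hlen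
    simp only [Option.getD_some]
    rw [hlen]
    simp
    omega

-- ===== VERDICT =====
theorem validate_trimming_feasibility_spec : Claim_equal_validate_trimming_feasibility := by
  intro content st et _
  unfold Spec_validate_trimming_feasibility validate_trimming_feasibility validate_trimming_feasibility_alt
  by_cases hemp : content.toList.isEmpty = true
  · simp [hemp]
  · rw [if_neg hemp, if_neg hemp]
    rw [scan_spec, pvTotals_spec, pvTotals_spec]
    simp only [PySem.Str.len_eq, zero_add]
    rw [← words_length, ← lines_length]
    split_ifs <;> simp_all
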